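-- pv_equiv track=rewrite | github.com/AssafHMor/codeJam | intro2cs-python/ex6/balanced_brackets.py | recursive_brackets_match
-- ===== SOURCE A (Python) =====
-- INDEX_COUNTER = 1  # a single movement in the string index
--
-- OPEN_BRACKET = "("  # an open bracket
--
-- CLOSE_BRACKET = ")"  # a close bracket
--
-- def recursive_brackets_match(s, index, pairs, open_b):
--     """
--     this method runs over a given string assuming its balanced parentheses-wise
--     and finds pairs of matching open and close parentheses, each time it finds
--     a pair, the two are put into a list where the open bracket is at the first
--     place and the close bracket is at the second place after running on the
--     whole string this method returns a list of lists of pairs.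
--     this method runs recursively on the given string
--     :param s: the string to check
--     :param index: the current index of the string
--     :param pairs: a list of lists of pairs
--     :param open_b: a stack to track the open brackets
--     :return: a list of lists each inner list is of size two representing the
--     index of the open bracket and it co-responding bracket's index
--     """
--     # the stopping condition - if the current index is equal to the length of s
--     # if so return the list of pairs
--     if index == len(s):
--         return pairs
--     # if the current index is '(' add its index to the open stack
--     if s[index] == OPEN_BRACKET:
--         open_b.append(index)
--     # if the current index is ')' add its index and the last open index to the
--     # pairs list, (the open index is poped from the open stack thus removed
--     # from the stack to keep track of the next matching brackets)
--     if s[index] == CLOSE_BRACKET: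
--         pairs.append([open_b.pop(), index])  # append the pair of indexes
--     # call the recursive function with the new parameters
--     return recursive_brackets_match(s, index++INDEX_COUNTER, pairs, open_b )
-- ===== SOURCE B (Python) =====
-- OPEN_BRACKET = "("  # an open bracket
--
-- CLOSE_BRACKET = ")"  # a close bracket
--
-- def recursive_brackets_match(s, index, pairs, open_b):
--     for i in range(index, len(s)):
--         c = s[i]
--         if c == OPEN_BRACKET:
--             open_b.append(i)
--         elif c == CLOSE_BRACKET:
--             pairs.append([open_b.pop(), i])
--     return pairs
-- ===== Notes on version B (the rewrite author's own statement) =====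
-- stated objective: idiomatic
-- what changed: A's tail recursion with an explicit index threaded through call frames is replaced by a single idiomatic for-loop over range(index, len(s)) mutating the two lists in place.
import Mathlib
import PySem

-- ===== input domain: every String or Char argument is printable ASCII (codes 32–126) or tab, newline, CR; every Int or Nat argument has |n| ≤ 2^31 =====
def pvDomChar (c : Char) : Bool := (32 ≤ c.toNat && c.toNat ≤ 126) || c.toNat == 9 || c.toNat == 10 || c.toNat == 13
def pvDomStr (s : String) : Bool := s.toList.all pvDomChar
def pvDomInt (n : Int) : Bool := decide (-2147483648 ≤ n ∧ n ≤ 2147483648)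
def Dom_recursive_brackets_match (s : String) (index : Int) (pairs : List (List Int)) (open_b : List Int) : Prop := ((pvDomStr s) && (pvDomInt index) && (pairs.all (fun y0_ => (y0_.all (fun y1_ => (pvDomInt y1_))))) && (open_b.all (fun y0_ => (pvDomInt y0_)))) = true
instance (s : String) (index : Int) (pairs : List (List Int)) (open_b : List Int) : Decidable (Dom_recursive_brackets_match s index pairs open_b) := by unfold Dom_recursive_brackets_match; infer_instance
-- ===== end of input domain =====

-- B replaces A's tail recursion by an idiomatic single `for i in range(index, len(s))` loop
-- (same return value; like A it mutates `pairs`/`open_b` in place, and the proved equivalence is about the return value).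

-- ===== PORT A =====

-- (used by the port's decreasing_by) a successful index read means index < len(s)
theorem pvGet_lt (s : String) (index : Int) (c : Char)
    (hc : PySem.Str.pyGet? s index = some c) : index < PySem.Str.len s := by
  by_contra h
  have hn : PySem.Str.pyGet? s index = none := by
    have : ¬ PySem.Raise.InRange s.toList.length index := by
      intro ⟨_, h2⟩
      exact h (by rw [PySem.Str.len_eq]; exact h2)
    simpa [PySem.Str.pyGet?, PySem.Chars.pyGet?, PySem.List.pyGet?_eq_none_iff] using this
  rw [hc] at hn; cases hn

def recursive_brackets_match (s : String) (index : Int) (pairs : List (List Int)) (open_b : List Int) : List (List Int) :=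
  if index = PySem.Str.len s then pairs
  else
    match hc : PySem.Str.pyGet? s index with
    | none => pairs  -- here Python's s[index] raises IndexError (excluded by Pre_)
    | some c =>
      let open_b2 := if c = '(' then open_b ++ [index] else open_b
      if c = ')' then
        match PySem.List.pop? open_b2 with
        | none => pairs  -- here Python's open_b.pop() raises IndexError (excluded by Pre_)
        | some (x, rest) => recursive_brackets_match s (index + 1) (pairs ++ [[x, index]]) rest
      else
        recursive_brackets_match s (index + 1) pairs open_b2
termination_by (PySem.Str.len s - index).toNat
decreasing_by all_goals (have := pvGet_lt s index c hc; omega)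

-- ===== PORT B =====

-- the body of B's for-loop, acting on the state (pairs, open_b)
def pvStep (s : String) (st : List (List Int) × List Int) (i : Int) : List (List Int) × List Int :=
  match PySem.Str.pyGet? s i with
  | none => st  -- here Python's s[i] raises IndexError (excluded by Pre_)
  | some c =>
    if c = '(' then (st.1, st.2 ++ [i])
    else if c = ')' then
      match PySem.List.pop? st.2 with
      | none => st  -- here Python's open_b.pop() raises IndexError (excluded by Pre_)
      | some (x, rest) => (st.1 ++ [[x, i]], rest)
    else st

def recursive_brackets_match_alt (s : String) (index : Int) (pairs : List (List Int)) (open_b : List Int) : List (List Int) :=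
  ((PySem.List.pyRange index (PySem.Str.len s) 1).foldl (pvStep s) (pairs, open_b)).1

-- ===== PRECONDITION & SPEC =====

-- +1 for '(', -1 for ')', 0 otherwise, at string position i (Python indexing)
def pvCharVal (s : String) (i : Int) : Int :=
  if PySem.Str.pyGet? s i = some '(' then 1
  else if PySem.Str.pyGet? s i = some ')' then -1 else 0

-- net bracket balance of positions a, a+1, …, b-1
def pvBal (s : String) (a b : Int) : Int :=
  ((PySem.List.pyRange a b 1).map (pvCharVal s)).sum

-- Pre_ is exactly where the Python A returns: the start index is in Python range for s
-- (−len(s) ≤ index ≤ len(s); otherwise s[index] raises IndexError) and at every ')' scanned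
-- the stack is nonempty (otherwise open_b.pop() raises IndexError).
def Pre_recursive_brackets_match (s : String) (index : Int) (pairs : List (List Int)) (open_b : List Int) : Prop :=
  -PySem.Str.len s ≤ index ∧ index ≤ PySem.Str.len s ∧
  ∀ j ∈ PySem.List.pyRange index (PySem.Str.len s) 1,
    PySem.Str.pyGet? s j = some ')' → 1 ≤ (open_b.length : Int) + pvBal s index j
instance (s : String) (index : Int) (pairs : List (List Int)) (open_b : List Int) : Decidable (Pre_recursive_brackets_match s index pairs open_b) := by unfold Pre_recursive_brackets_match; infer_instance

def pvWitness_recursive_brackets_match : String × Int × List (List Int) × List Int := ("(()())", 0, [], [])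

def Spec_recursive_brackets_match (s : String) (index : Int) (pairs : List (List Int)) (open_b : List Int) (out : List (List Int)) : Prop := out = recursive_brackets_match_alt s index pairs open_b
instance (s : String) (index : Int) (pairs : List (List Int)) (open_b : List Int) (out : List (List Int)) : Decidable (Spec_recursive_brackets_match s index pairs open_b out) := by unfold Spec_recursive_brackets_match; infer_instance

-- ===== CLAIM (what is proved, stated in full; the proofs are below) =====
def Claim_equal_recursive_brackets_match : Prop := ∀ (s : String) (index : Int) (pairs : List (List Int)) (open_b : List Int), Dom_recursive_brackets_match s index pairs open_b → Pre_recursive_brackets_match s index pairs open_b → Spec_recursive_brackets_match s index pairs open_b (recursive_brackets_match s index pairs open_b)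
-- ===== LEMMAS AND PROOFS =====

theorem pvWitness_ok : Dom_recursive_brackets_match (pvWitness_recursive_brackets_match.1) (pvWitness_recursive_brackets_match.2.1) (pvWitness_recursive_brackets_match.2.2.1) (pvWitness_recursive_brackets_match.2.2.2) ∧ Pre_recursive_brackets_match (pvWitness_recursive_brackets_match.1) (pvWitness_recursive_brackets_match.2.1) (pvWitness_recursive_brackets_match.2.2.1) (pvWitness_recursive_brackets_match.2.2.2) := by decide

theorem pvPop_some {xs : List Int} (h : xs ≠ []) :
    ∃ x rest, PySem.List.pop? xs = some (x, rest) := by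
  have h2 := xs.dropLast_concat_getLast h
  rw [← h2]
  exact ⟨_, _, PySem.List.pop?_last _ _⟩

theorem pvGet_some (s : String) (i : Int) (h1 : -PySem.Str.len s ≤ i) (h2 : i < PySem.Str.len s) :
    ∃ c, PySem.Str.pyGet? s i = some c := by
  cases hc : PySem.Str.pyGet? s i with
  | some c => exact ⟨c, rfl⟩
  | none =>
    exfalso
    rw [PySem.Str.len_eq] at h1 h2
    have : ¬ PySem.Raise.InRange s.toList.length i := by
      simpa [PySem.Str.pyGet?, PySem.Chars.pyGet?, PySem.List.pyGet?_eq_none_iff] using hc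
    exact this ⟨by exact_mod_cast h1, by exact_mod_cast h2⟩

theorem pvA_stop (s : String) (index : Int) (pairs : List (List Int)) (open_b : List Int)
    (h : index = PySem.Str.len s) :
    recursive_brackets_match s index pairs open_b = pairs := by
  rw [recursive_brackets_match]; simp [h]

theorem pvA_step (s : String) (index : Int) (pairs : List (List Int)) (open_b : List Int)
    (c : Char) (hne : index ≠ PySem.Str.len s) (hc : PySem.Str.pyGet? s index = some c) :
    recursive_brackets_match s index pairs open_b =
      (if c = '(' then
        recursive_brackets_match s (index + 1) pairs (open_b ++ [index])
      else if c = ')' then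
        match PySem.List.pop? open_b with
        | none => pairs
        | some (x, rest) => recursive_brackets_match s (index + 1) (pairs ++ [[x, index]]) rest
      else recursive_brackets_match s (index + 1) pairs open_b) := by
  have hc' : PySem.List.pyGet? s.toList index = some c := hc
  rw [recursive_brackets_match, if_neg hne]
  split
  · next heq => rw [hc] at heq; cases heq
  · next c2 heq =>
      rw [hc] at heq
      injection heq with h
      subst h
      by_cases h1 : c = '('
      · subst h1; simp
      · by_cases h2 : c = ')'
        · subst h2; simp
        · simp [h1, h2]

theorem pvB_cons (s : String) (index : Int) (pairs : List (List Int)) (open_b : List Int)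
    (h : index < PySem.Str.len s) :
    recursive_brackets_match_alt s index pairs open_b =
      recursive_brackets_match_alt s (index + 1) (pvStep s (pairs, open_b) index).1
        (pvStep s (pairs, open_b) index).2 := by
  unfold recursive_brackets_match_alt
  rw [PySem.List.pyRange_one_cons h]
  simp

theorem pvBal_cons (s : String) (a b : Int) (h : a < b) :
    pvBal s a b = pvCharVal s a + pvBal s (a + 1) b := by
  unfold pvBal
  rw [PySem.List.pyRange_one_cons h]
  simp

theorem pvBal_nil (s : String) (a : Int) : pvBal s a a = 0 := by
  unfold pvBal
  rw [PySem.List.pyRange_one_eq_nil le_rfl]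
  simp

theorem pvMain (s : String) : ∀ (n : Nat) (index : Int) (pairs : List (List Int)) (open_b : List Int),
    (PySem.Str.len s - index).toNat = n →
    -PySem.Str.len s ≤ index → index ≤ PySem.Str.len s →
    (∀ j ∈ PySem.List.pyRange index (PySem.Str.len s) 1,
      PySem.Str.pyGet? s j = some ')' → 1 ≤ (open_b.length : Int) + pvBal s index j) →
    recursive_brackets_match s index pairs open_b = recursive_brackets_match_alt s index pairs open_b := by
  intro n
  induction n with
  | zero =>
    intro index pairs open_b hn h1 h2 _
    have he : index = PySem.Str.len s := by omega
    rw [pvA_stop s index pairs open_b he]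
    unfold recursive_brackets_match_alt
    rw [PySem.List.pyRange_one_eq_nil (le_of_eq he.symm)]
    simp
  | succ n ih =>
    intro index pairs open_b hn h1 h2 hpre
    have hlt : index < PySem.Str.len s := by omega
    obtain ⟨c, hc⟩ := pvGet_some s index h1 hlt
    have hc' : PySem.List.pyGet? s.toList index = some c := hc
    have hmemj : ∀ j, j ∈ PySem.List.pyRange (index + 1) (PySem.Str.len s) 1 →
        j ∈ PySem.List.pyRange index (PySem.Str.len s) 1 := by
      intro j hj
      rw [PySem.List.mem_pyRange_one] at hj ⊢
      omega
    have hjlt : ∀ j, j ∈ PySem.List.pyRange (index + 1) (PySem.Str.len s) 1 → index < j := by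
      intro j hj; rw [PySem.List.mem_pyRange_one] at hj; omega
    rw [pvA_step s index pairs open_b c (by omega) hc, pvB_cons s index pairs open_b hlt]
    by_cases ho : c = '('
    · subst ho
      have hs : pvStep s (pairs, open_b) index = (pairs, open_b ++ [index]) := by
        simp [pvStep, hc']
      rw [if_pos rfl, hs]
      apply ih (index + 1) pairs (open_b ++ [index]) (by omega) (by omega) (by omega)
      intro j hj hcj
      have := hpre j (hmemj j hj) hcj
      rw [pvBal_cons s index j (hjlt j hj)] at this
      have hv : pvCharVal s index = 1 := by simp [pvCharVal, hc']
      rw [hv] at this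
      simp only [List.length_append, List.length_cons, List.length_nil]
      push_cast
      linarith
    · by_cases hcl : c = ')'
      · subst hcl
        have hne : open_b ≠ [] := by
          have hm : index ∈ PySem.List.pyRange index (PySem.Str.len s) 1 := by
            rw [PySem.List.mem_pyRange_one]; omega
          have := hpre index hm hc
          rw [pvBal_nil] at this
          intro hnil
          rw [hnil] at this
          simp at this
        obtain ⟨x, rest, hp⟩ := pvPop_some hne
        have hlen : rest.length + 1 = open_b.length := PySem.List.length_of_pop?_eq_some open_b hp
        have hs : pvStep s (pairs, open_b) index = (pairs ++ [[x, index]], rest) := by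
          simp [pvStep, hc', hp]
        rw [if_neg (by decide), if_pos rfl, hp, hs]
        apply ih (index + 1) (pairs ++ [[x, index]]) rest (by omega) (by omega) (by omega)
        intro j hj hcj
        have := hpre j (hmemj j hj) hcj
        rw [pvBal_cons s index j (hjlt j hj)] at this
        have hv : pvCharVal s index = -1 := by simp [pvCharVal, hc']
        rw [hv] at this
        have : 1 ≤ (open_b.length : Int) + (-1 + pvBal s (index + 1) j) := this
        have hcast : (rest.length : Int) + 1 = (open_b.length : Int) := by exact_mod_cast hlen
        linarith
      · have hs : pvStep s (pairs, open_b) index = (pairs, open_b) := by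
          simp [pvStep, hc', ho, hcl]
        rw [if_neg ho, if_neg hcl, hs]
        apply ih (index + 1) pairs open_b (by omega) (by omega) (by omega)
        intro j hj hcj
        have := hpre j (hmemj j hj) hcj
        rw [pvBal_cons s index j (hjlt j hj)] at this
        have hv : pvCharVal s index = 0 := by simp [pvCharVal, hc', ho, hcl]
        rw [hv] at this
        linarith

-- ===== VERDICT (by name: the statement is the Claim_ definition above) =====
theorem recursive_brackets_match_spec : Claim_equal_recursive_brackets_match := by
  intro s index pairs open_b _ hpre
  obtain ⟨h1, h2, h3⟩ := hpre
  exact pvMain s (PySem.Str.len s - index).toNat index pairs open_b rfl h1 h2 h3
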